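-- pv_equiv track=rewrite | github.com/Gabriela-Dumanska/algorithms-and-data-structures | graph-algorithms/Matrix/strongly-connected-components.py | first_DFS
-- ===== SOURCE A (Python) =====
-- def first_DFS(G):
--     visited=[False  for _ in range(len(G))]
--     stack=[]
--     def dfs_visit(u):
--         visited[u]=True
--         for v in range (len(G)):
--             if not visited[v] and G[u][v]!=0:
--                 dfs_visit(v)
--         stack.append(u)
--     for u in range(len(G)):
--         if not visited[u]:
--             dfs_visit(u)
--     return stack
-- ===== SOURCE B (Python) =====
-- def first_DFS(G):
--     n = len(G)
--     visited = [False] * n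
--     order = []
--     for s in range(n):
--         if visited[s]:
--             continue
--         visited[s] = True
--         frames = [(s, 0)]
--         while frames:
--             u, i = frames[-1]
--             if i >= n:
--                 frames.pop()
--                 order.append(u)
--             elif not visited[i] and G[u][i] != 0:
--                 frames[-1] = (u, i + 1)
--                 visited[i] = True
--                 frames.append((i, 0))
--             else:
--                 frames[-1] = (u, i + 1)
--     return order
-- ===== Notes on version B (the rewrite author's own statement) =====
-- stated objective: alternative
-- what changed: the recursive dfs_visit closure is replaced by an explicit stack of (node, next-neighbor-index) frames: an inner while-loop advances the top frame's index, pushes newly discovered neighbors, and emits a node when its row is exhausted, producing the identical post-order without recursion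
-- outside the precondition, e.g. on first_DFS([[0, 1], [1]]): A returns [1, 0], B returns [1, 0]
import Mathlib
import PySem

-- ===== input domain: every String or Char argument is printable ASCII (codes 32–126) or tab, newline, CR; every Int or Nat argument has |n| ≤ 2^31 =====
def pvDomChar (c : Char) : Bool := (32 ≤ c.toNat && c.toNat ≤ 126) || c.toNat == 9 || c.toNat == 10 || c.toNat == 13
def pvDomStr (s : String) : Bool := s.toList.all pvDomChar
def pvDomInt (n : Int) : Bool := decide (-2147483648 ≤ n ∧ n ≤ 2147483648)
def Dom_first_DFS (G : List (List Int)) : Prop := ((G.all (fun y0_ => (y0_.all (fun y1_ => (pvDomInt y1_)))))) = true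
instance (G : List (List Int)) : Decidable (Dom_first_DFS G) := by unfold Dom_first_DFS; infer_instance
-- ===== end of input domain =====

-- B replaces A's recursive dfs_visit by an explicit stack of (node, next-neighbor-index)
-- frames producing the identical DFS post-order; equal return values are proved on
-- matrices whose rows have length ≥ len(G), where the Python A returns without IndexError.

-- ===== PORT A =====
-- A's dfs_visit: the fuel argument (first Nat) is only a totality guard; first_DFS
-- supplies fuel G.length, which never runs out because each dfs_visit call marks one
-- more node visited (the fuel-0 branch is unreachable from first_DFS).
def dfsA (G : List (List Int)) : Nat → Nat → List Bool → List Int → List Bool × List Int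
  | 0, _, vis, stk => (vis, stk)
  | f + 1, u, vis, stk =>
    let p := (List.range G.length).foldl
      (fun st v =>
        if st.1.getD v true = false ∧ (G.getD u []).getD v 0 ≠ 0 then
          dfsA G f v st.1 st.2
        else st)
      (vis.set u true, stk)
    (p.1, p.2 ++ [Int.ofNat u])

def first_DFS (G : List (List Int)) : List Int :=
  ((List.range G.length).foldl
    (fun st u => if st.1.getD u true = false then dfsA G G.length u st.1 st.2 else st)
    (List.replicate G.length false, ([] : List Int))).2

-- ===== PORT B =====
-- B's inner while-loop over the frame stack (head of `frames` = Python's stack top).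
-- The fuel (first Nat) is only a totality guard; first_DFS_alt supplies
-- (len(G)+3)*(len(G)+1)+1 per outer iteration, which provably never runs out.
def runB (G : List (List Int)) : Nat → List (Nat × Nat) → List Bool → List Int → List Bool × List Int
  | 0, _, vis, out => (vis, out)
  | F + 1, frames, vis, out =>
    match frames with
    | [] => (vis, out)
    | (u, i) :: rest =>
      if i < G.length then
        if vis.getD i true = false ∧ (G.getD u []).getD i 0 ≠ 0 then
          runB G F ((i, 0) :: (u, i + 1) :: rest) (vis.set i true) out
        else runB G F ((u, i + 1) :: rest) vis out
      else runB G F rest vis (out ++ [Int.ofNat u])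

def first_DFS_alt (G : List (List Int)) : List Int :=
  ((List.range G.length).foldl
    (fun st s =>
      if st.1.getD s true = false then
        runB G ((G.length + 3) * (G.length + 1) + 1) [(s, 0)] (st.1.set s true) st.2
      else st)
    (List.replicate G.length false, ([] : List Int))).2

-- ===== PRECONDITION & SPEC =====
-- Pre_ excludes matrices with a row shorter than len(G): on those the Python A in
-- general raises IndexError (whether it does depends on the visit order, so the whole
-- ragged class is excluded; both programs read the same cells and agree wherever A
-- happens to return anyway, as on the cited example).
def Pre_first_DFS (G : List (List Int)) : Prop := ∀ row ∈ G, G.length ≤ row.length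
instance (G : List (List Int)) : Decidable (Pre_first_DFS G) := by
  unfold Pre_first_DFS; infer_instance

def pvWitness_first_DFS : List (List Int) := [[0, 1, 0], [0, 0, 1], [1, 0, 0]]

def Spec_first_DFS (G : List (List Int)) (out : List Int) : Prop := out = first_DFS_alt G
instance (G : List (List Int)) (out : List Int) : Decidable (Spec_first_DFS G out) := by
  unfold Spec_first_DFS; infer_instance

-- ===== CLAIM (what is proved, stated in full; the proofs are below) =====
def Claim_equal_first_DFS : Prop :=
  ∀ (G : List (List Int)), Dom_first_DFS G → Pre_first_DFS G →
    Spec_first_DFS G (first_DFS G)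

-- ===== LEMMAS AND PROOFS =====

-- the fold step of A's neighbor loop (definitionally the lambda inside dfsA)
def stepA (G : List (List Int)) (f u : Nat) (st : List Bool × List Int) (v : Nat) :
    List Bool × List Int :=
  if st.1.getD v true = false ∧ (G.getD u []).getD v 0 ≠ 0 then dfsA G f v st.1 st.2
  else st

theorem dfsA_succ (G : List (List Int)) (f u : Nat) (vis : List Bool) (stk : List Int) :
    dfsA G (f + 1) u vis stk =
      (((List.range G.length).foldl (stepA G f u) (vis.set u true, stk)).1,
       ((List.range G.length).foldl (stepA G f u) (vis.set u true, stk)).2 ++ [Int.ofNat u]) := rfl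

-- termination measure of B's while-loop (proof-side only)
def mB (G : List (List Int)) (frames : List (Nat × Nat)) (vis : List Bool) : Nat :=
  (G.length + 3) * vis.count false + (frames.map (fun p => G.length + 2 - p.2)).sum +
    frames.length

theorem pvCountFalseSet (l : List Bool) (i : Nat) (h : l.getD i true = false) :
    (l.set i true).count false + 1 = l.count false := by
  induction l generalizing i with
  | nil => simp at h
  | cons b t ih =>
    cases i with
    | zero => simp_all
    | succ j =>
      simp only [List.getD_cons_succ] at h
      simp only [List.set_cons_succ, List.count_cons]
      have := ih j h
      omega

theorem pvCountSetLe (l : List Bool) (i : Nat) :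
    (l.set i true).count false ≤ l.count false := by
  induction l generalizing i with
  | nil => simp
  | cons b t ih =>
    cases i with
    | zero => cases b <;> simp
    | succ j => simp only [List.set_cons_succ, List.count_cons]; have := ih j; omega

theorem pvDfsLen (G : List (List Int)) :
    ∀ f u vis stk, ((dfsA G f u vis stk).1).length = vis.length := by
  intro f
  induction f with
  | zero => intro u vis stk; rfl
  | succ f ih =>
    intro u vis stk
    rw [dfsA_succ]
    have aux : ∀ (l : List Nat) (st : List Bool × List Int),
        ((l.foldl (stepA G f u) st).1).length = (st.1).length := by
      intro l
      induction l with
      | nil => intro st; rfl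
      | cons v l ihl =>
        intro st
        rw [List.foldl_cons]
        rw [ihl]
        unfold stepA
        split
        · exact ih v st.1 st.2
        · rfl
    simp only
    rw [aux, List.length_set]

theorem pvDfsCount (G : List (List Int)) :
    ∀ f u vis stk, ((dfsA G f u vis stk).1).count false ≤ vis.count false := by
  intro f
  induction f with
  | zero => intro u vis stk; exact le_refl _
  | succ f ih =>
    intro u vis stk
    rw [dfsA_succ]
    have aux : ∀ (l : List Nat) (st : List Bool × List Int),
        ((l.foldl (stepA G f u) st).1).count false ≤ (st.1).count false := by
      intro l
      induction l with
      | nil => intro st; exact le_refl _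
      | cons v l ihl =>
        intro st
        rw [List.foldl_cons]
        refine le_trans (ihl _) ?_
        unfold stepA
        split
        · exact ih v st.1 st.2
        · exact le_refl _
    simp only
    exact le_trans (aux _ _) (pvCountSetLe vis u)

-- one step of runB strictly decreases mB
theorem pvRunBIrrel (G : List (List Int)) :
    ∀ F1 F2 frames vis out, mB G frames vis < F1 → mB G frames vis < F2 →
      runB G F1 frames vis out = runB G F2 frames vis out := by
  intro F1
  induction F1 using Nat.strong_induction_on with
  | _ F1 IH =>
    intro F2 frames vis out h1 h2
    obtain ⟨F1', rfl⟩ : ∃ x, F1 = x + 1 := ⟨F1 - 1, by omega⟩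
    obtain ⟨F2', rfl⟩ : ∃ x, F2 = x + 1 := ⟨F2 - 1, by omega⟩
    cases frames with
    | nil => rfl
    | cons p rest =>
      obtain ⟨u, i⟩ := p
      simp only [runB]
      by_cases hi : i < G.length
      · simp only [if_pos hi]
        by_cases hg : vis.getD i true = false ∧ (G.getD u []).getD i 0 ≠ 0
        · simp only [if_pos hg]
          have hc := pvCountFalseSet vis i hg.1
          have hm : mB G ((i, 0) :: (u, i + 1) :: rest) (vis.set i true) + 1 ≤
              mB G ((u, i) :: rest) vis := by
            simp only [mB, List.map_cons, List.sum_cons, List.length_cons]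
            have h4 : (G.length + 3) * vis.count false =
                (G.length + 3) * ((vis.set i true).count false) + (G.length + 3) := by
              rw [← hc]; ring
            omega
          exact IH F1' (by omega) F2' _ _ out (by omega) (by omega)
        · simp only [if_neg hg]
          have hm : mB G ((u, i + 1) :: rest) vis + 1 ≤ mB G ((u, i) :: rest) vis := by
            simp only [mB, List.map_cons, List.sum_cons, List.length_cons]; omega
          exact IH F1' (by omega) F2' _ _ out (by omega) (by omega)
      · simp only [if_neg hi]
        have hm : mB G rest vis + 1 ≤ mB G ((u, i) :: rest) vis := by
          simp only [mB, List.map_cons, List.sum_cons, List.length_cons]; omega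
        exact IH F1' (by omega) F2' _ _ _ (by omega) (by omega)

-- the simulation: B's frame machine, run from a frame (u, v) on top, computes exactly
-- A's neighbor loop of dfs_visit(u) from index v, then pops, emitting u
theorem pvSim (G : List (List Int)) :
    ∀ f k u v vis stk rest F F',
      v + k = G.length → vis.count false ≤ f →
      mB G ((u, v) :: rest) vis < F →
      mB G rest (((List.range' v k).foldl (stepA G f u) (vis, stk)).1) < F' →
      runB G F ((u, v) :: rest) vis stk =
        runB G F' rest (((List.range' v k).foldl (stepA G f u) (vis, stk)).1)
          ((((List.range' v k).foldl (stepA G f u) (vis, stk)).2) ++ [Int.ofNat u]) := by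
  intro f
  induction f using Nat.strong_induction_on with
  | _ f IHf =>
    intro k
    induction k with
    | zero =>
      intro u v vis stk rest F F' hvk hc hF hF'
      simp only [List.range', List.foldl_nil] at *
      obtain ⟨F1, rfl⟩ : ∃ x, F = x + 1 := ⟨F - 1, by omega⟩
      have hv : ¬ v < G.length := by omega
      simp only [runB, if_neg hv]
      have hm : mB G rest vis + 1 ≤ mB G ((u, v) :: rest) vis := by
        simp only [mB, List.map_cons, List.sum_cons, List.length_cons]; omega
      exact pvRunBIrrel G F1 F' rest vis _ (by omega) hF'
    | succ k IHk =>
      intro u v vis stk rest F F' hvk hc hF hF'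
      obtain ⟨F1, rfl⟩ : ∃ x, F = x + 1 := ⟨F - 1, by omega⟩
      have hv : v < G.length := by omega
      rw [List.range'_succ] at hF' ⊢
      simp only [List.foldl_cons] at hF' ⊢
      by_cases hg : vis.getD v true = false ∧ (G.getD u []).getD v 0 ≠ 0
      · -- neighbor v is taken: A recurses into dfs_visit(v); B pushes frame (v, 0)
        have hc1 := pvCountFalseSet vis v hg.1
        obtain ⟨f', rfl⟩ : ∃ x, f = x + 1 := ⟨f - 1, by omega⟩
        have hstep : stepA G (f' + 1) u (vis, stk) v = dfsA G (f' + 1) v vis stk := by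
          unfold stepA; exact if_pos hg
        simp only [runB, if_pos hv, if_pos hg]
        rw [hstep] at hF' ⊢
        -- unfold the recursive dfs_visit(v) as its own neighbor fold
        rw [dfsA_succ] at hF' ⊢
        set q := (List.range G.length).foldl (stepA G f' v) (vis.set v true, stk) with hq
        have hmid : mB G ((u, v + 1) :: rest) q.1 <
            mB G ((u, v + 1) :: rest) q.1 + 1 := by omega
        have h1 : runB G F1 ((v, 0) :: (u, v + 1) :: rest) (vis.set v true) stk =
            runB G (mB G ((u, v + 1) :: rest) q.1 + 1) ((u, v + 1) :: rest) q.1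
              (q.2 ++ [Int.ofNat v]) := by
          have := IHf f' (by omega) G.length v 0 (vis.set v true) stk
            ((u, v + 1) :: rest) F1 (mB G ((u, v + 1) :: rest) q.1 + 1)
            (by omega) (by omega)
            (by
              have hd : mB G ((v, 0) :: (u, v + 1) :: rest) (vis.set v true) + 1 ≤
                  mB G ((u, v) :: rest) vis := by
                simp only [mB, List.map_cons, List.sum_cons, List.length_cons]
                have h4 : (G.length + 3) * vis.count false =
                    (G.length + 3) * ((vis.set v true).count false) + (G.length + 3) := by
                  rw [← hc1]; ring
                omega
              omega)
            (by rw [← List.range_eq_range', ← hq]; omega)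
          rw [← List.range_eq_range', ← hq] at this
          exact this
        rw [h1]
        -- continue u's loop from index v+1 on the updated state
        exact IHk u (v + 1) q.1 (q.2 ++ [Int.ofNat v]) rest
          (mB G ((u, v + 1) :: rest) q.1 + 1) F' (by omega)
          (by
            have hql : q.1.count false ≤ (vis.set v true).count false := by
              have aux : ∀ (l : List Nat) (st : List Bool × List Int),
                  ((l.foldl (stepA G f' v) st).1).count false ≤ (st.1).count false := by
                intro l
                induction l with
                | nil => intro st; exact le_refl _
                | cons w l ihl =>
                  intro st
                  rw [List.foldl_cons]
                  refine le_trans (ihl _) ?_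
                  unfold stepA
                  split
                  · exact pvDfsCount G f' w st.1 st.2
                  · exact le_refl _
              exact aux _ _
            omega)
          (by omega) hF'
      · -- neighbor v is skipped by both
        have hstep : stepA G f u (vis, stk) v = (vis, stk) := by
          unfold stepA; exact if_neg hg
        simp only [runB, if_pos hv, if_neg hg]
        rw [hstep] at hF' ⊢
        exact IHk u (v + 1) vis stk rest F1 F' (by omega) hc
          (by
            have hm : mB G ((u, v + 1) :: rest) vis + 1 ≤ mB G ((u, v) :: rest) vis := by
              simp only [mB, List.map_cons, List.sum_cons, List.length_cons]; omega
            omega)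
          hF'

theorem pvFoldEq (G : List (List Int)) :
    ∀ (l : List Nat) (st : List Bool × List Int), st.1.length = G.length →
      l.foldl
        (fun st u => if st.1.getD u true = false then dfsA G G.length u st.1 st.2 else st)
        st =
      l.foldl
        (fun st s =>
          if st.1.getD s true = false then
            runB G ((G.length + 3) * (G.length + 1) + 1) [(s, 0)] (st.1.set s true) st.2
          else st)
        st := by
  intro l
  induction l with
  | nil => intro st _; rfl
  | cons u l ih =>
    intro st hlen
    simp only [List.foldl_cons]
    by_cases hu : st.1.getD u true = false
    · simp only [if_pos hu]
      have hul : u < st.1.length := by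
        by_contra h
        rw [List.getD_eq_default _ _ (by omega)] at hu
        exact absurd hu (by simp)
      obtain ⟨m, hm⟩ : ∃ m, G.length = m + 1 := ⟨G.length - 1, by omega⟩
      have hc := pvCountFalseSet st.1 u hu
      have hcl : st.1.count false ≤ G.length := hlen ▸ List.count_le_length
      have hsl : (st.1.set u true).count false ≤ G.length := by omega
      have hstep : runB G ((G.length + 3) * (G.length + 1) + 1) [(u, 0)]
            (st.1.set u true) st.2 = dfsA G G.length u st.1 st.2 := by
        set q := (List.range G.length).foldl (stepA G m u) (st.1.set u true, st.2) with hq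
        have h1 : runB G ((G.length + 3) * (G.length + 1) + 1) [(u, 0)]
              (st.1.set u true) st.2 =
            runB G (mB G [] q.1 + 1) [] q.1 (q.2 ++ [Int.ofNat u]) := by
          have := pvSim G m G.length u 0 (st.1.set u true) st.2 []
            ((G.length + 3) * (G.length + 1) + 1) (mB G [] q.1 + 1)
            (by omega) (by omega)
            (by
              simp only [mB, List.map_cons, List.sum_cons, List.length_cons,
                List.map_nil, List.sum_nil, List.length_nil]
              have hb1 : (G.length + 3) * ((st.1.set u true).count false) ≤
                  (G.length + 3) * G.length := Nat.mul_le_mul_left _ hsl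
              have hb2 : (G.length + 3) * (G.length + 1) =
                  (G.length + 3) * G.length + (G.length + 3) := by ring
              omega)
            (by rw [← List.range_eq_range', ← hq]; omega)
          rw [← List.range_eq_range', ← hq] at this
          exact this
        rw [h1]
        have : runB G (mB G [] q.1 + 1) [] q.1 (q.2 ++ [Int.ofNat u]) =
            (q.1, q.2 ++ [Int.ofNat u]) := rfl
        rw [this, hm, dfsA_succ]
      rw [hstep]
      exact ih _ (by rw [pvDfsLen]; exact hlen)
    · simp only [if_neg hu]
      exact ih st hlen

theorem first_DFS_main (G : List (List Int)) : first_DFS G = first_DFS_alt G := by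
  unfold first_DFS first_DFS_alt
  rw [pvFoldEq G _ _ (by simp)]

-- ===== VERDICT (by name: the statement is the Claim_ definition above) =====
theorem first_DFS_spec : Claim_equal_first_DFS := by
  intro G _ _
  unfold Spec_first_DFS
  exact first_DFS_main G
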